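-- pv_equiv track=rewrite | github.com/envomp/2018-Introduction-to-Programming | pr14_exam/exam.py | robot_movement
-- ===== SOURCE A (Python) =====
-- def robot_movement(orders):
--     """
--     Given a string with robot orders, return the end position and the number of orders executed.
--
--     #06
--
--     The robot knows the following orders:
--     - L - turn 90 degrees left
--     - R - turn 90 degrees right
--     - D - drive 1 step
--
--     There are other orders in the string, but you should ignore those for this exercise.
--     In front of an order, there can be a multiplier which indicates how many times the following order is executed.
--     For example:
--     3D - drives 3 steps
--     3L - turns 3 times 90 degree left (when starting heading north, it will then be heading east)
--     123D - drives 123 steps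
--     A - ignore this order
--     5A - still ignore (both 5 and A)
--     5AD - is the same as just "D"
--
--     The robot starts at (0, 0) heading north. The result should be a tuple in format: (x, y, number of orders executed).
--     x grows from west to east, y grows from south to north.
--
--     Examples:
--
--     robot_movement("DDDRDD") => (2, 3, 6)
--     robot_movement("RRRLLLL") => (0, 0, 7)
--     robot_movement("RRR7L") => (0, 0, 10)
--     robot_movement("7A7BD") => (0, 1, 1)
--
--     :param orders:
--     :return:
--     """
--     directions = {
--         "S": (0, -1),
--         "N": (0, 1),
--         "E": (1, 0),
--         "W": (-1, 0)
--     }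
--     cur_pos_x = 0
--     cur_pos_y = 0
--     cur_dir = "N"
--     number = ""
--     steps = 0
--
--     for order in orders:
--         if order.isnumeric():
--             number += order
--         else:
--             if len(number):
--                 if order in ("L", "R"):
--                     for i in range(0, int(number) % 4):
--                         cur_dir = new_dir(cur_dir, order)
--                     steps += int(number)
--                 elif order == "D":
--                     cur_pos_x += directions[cur_dir][0] * int(number)
--                     cur_pos_y += directions[cur_dir][1] * int(number)
--                     steps += int(number)
--                 number = ""
--             else:
--                 if order in ("L", "R"):
--                     cur_dir = new_dir(cur_dir, order)
--                     steps += 1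
--                 elif order == "D":
--                     cur_pos_x += directions[cur_dir][0]
--                     cur_pos_y += directions[cur_dir][1]
--                     steps += 1
--
--     return (cur_pos_x, cur_pos_y, steps)
--
-- def new_dir(cur_dir: str, turn: str) -> str:
--     """Calculate new direction."""
--     dirs = ["N", "E", "S", "W"]
--     cur_pos = dirs.index(cur_dir)
--     if turn == 'L':
--         new_pos = 3 if cur_pos == 0 else cur_pos - 1
--     elif turn == 'R':
--         new_pos = 0 if cur_pos == 3 else cur_pos + 1
--     else:
--         return cur_dir
--     return dirs[new_pos]
-- ===== SOURCE B (Python) =====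
-- def robot_movement(orders):
--     # Tokenize into (multiplier, command) pairs, then apply each token with a
--     # heading vector (dx, dy) instead of named directions.
--     tokens = []
--     run = ""
--     for ch in orders:
--         if ch.isnumeric():
--             run += ch
--         else:
--             tokens.append((int(run) if run else 1, ch))
--             run = ""
--     x = y = steps = 0
--     dx, dy = 0, 1  # facing north
--     for n, cmd in tokens:
--         if cmd == "L":
--             for _ in range(n % 4):
--                 dx, dy = -dy, dx
--             steps += n
--         elif cmd == "R":
--             for _ in range(n % 4):
--                 dx, dy = dy, -dx
--             steps += n
--         elif cmd == "D":
--             x += dx * n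
--             y += dy * n
--             steps += n
--     return (x, y, steps)
-- ===== Notes on version B (the rewrite author's own statement) =====
-- stated objective: alternative
-- what changed: B first tokenizes the order string into (multiplier, command) pairs in one pass, then folds over the tokens with the heading kept as a rotated (dx, dy) vector, replacing A's interleaved digit/state machine with its direction-name table, dict lookups and list.index-based new_dir helper.
import Mathlib
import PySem

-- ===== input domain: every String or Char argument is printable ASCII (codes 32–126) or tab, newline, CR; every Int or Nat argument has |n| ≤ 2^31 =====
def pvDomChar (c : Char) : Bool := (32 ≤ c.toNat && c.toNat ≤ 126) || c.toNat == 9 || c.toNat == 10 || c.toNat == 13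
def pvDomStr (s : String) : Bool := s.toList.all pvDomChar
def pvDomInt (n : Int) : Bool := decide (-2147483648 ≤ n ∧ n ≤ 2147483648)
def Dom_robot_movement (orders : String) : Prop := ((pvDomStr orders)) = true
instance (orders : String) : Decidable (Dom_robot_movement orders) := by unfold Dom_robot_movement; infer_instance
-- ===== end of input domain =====

-- B re-implements A by tokenizing the orders into (multiplier, command) pairs and folding
-- over tokens with the heading as a rotated (dx, dy) vector; alternative decomposition, same cost.

-- str.isnumeric(): exact on the printable-ASCII domain, where the numeric characters are '0'..'9'.
def pvIsNumeric (c : Char) : Bool := PySem.Chars.isdigit c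

-- ===== PORT A =====
-- new_dir helper; cur_dir is always one of the four names, so dirs.index and dirs[new_pos]
-- never raise: the .getD defaults are unreachable.
def pvNewDir (cur : String) (turn : Char) : String :=
  let dirs : List String := ["N", "E", "S", "W"]
  let curPos : Int := ((PySem.List.index? dirs cur).getD 0 : Nat)
  if turn = 'L' then
    let newPos : Int := if curPos = 0 then 3 else curPos - 1
    (PySem.List.pyGet? dirs newPos).getD ""
  else if turn = 'R' then
    let newPos : Int := if curPos = 3 then 0 else curPos + 1
    (PySem.List.pyGet? dirs newPos).getD ""
  else cur

-- the body of A's for-loop; state = (x, y, dir, number, steps); number kept as List Char.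
-- int(number) is ported as (ofStr? …).getD 0; number is a nonempty digit run there, so ofStr? = some.
def pvStepA (dirs : PySem.Dict String (Int × Int))
    (s : Int × Int × String × List Char × Int) (order : Char) :
    Int × Int × String × List Char × Int :=
  let (x, y, dir, number, steps) := s
  if pvIsNumeric order then (x, y, dir, number ++ [order], steps)
  else if number.length ≠ 0 then
    let n : Int := (PySem.Int.ofStr? (String.ofList number)).getD 0
    if order = 'L' ∨ order = 'R' then
      let dir := (PySem.List.pyRange 0 (PySem.Int.mod n 4) 1).foldl
        (fun d _ => pvNewDir d order) dir
      (x, y, dir, [], steps + n)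
    else if order = 'D' then
      let v := (PySem.Dict.get? dirs dir).getD (0, 0)  -- dir always a key: default unreachable
      (x + v.1 * n, y + v.2 * n, dir, [], steps + n)
    else (x, y, dir, [], steps)
  else
    if order = 'L' ∨ order = 'R' then
      (x, y, pvNewDir dir order, [], steps + 1)
    else if order = 'D' then
      let v := (PySem.Dict.get? dirs dir).getD (0, 0)
      (x + v.1, y + v.2, dir, [], steps + 1)
    else (x, y, dir, [], steps)

def robot_movement (orders : String) : Int × Int × Int :=
  let directions : PySem.Dict String (Int × Int) :=
    PySem.Dict.ofList [("S", (0, -1)), ("N", (0, 1)), ("E", (1, 0)), ("W", (-1, 0))]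
  let st := orders.toList.foldl (pvStepA directions) (0, 0, "N", [], 0)
  (st.1, st.2.1, st.2.2.2.2)

-- ===== PORT B =====
-- Source B's tokenizing loop, as structural recursion over the characters with the digit run as state.
def pvTokenize (cs : List Char) (run : List Char) : List (Int × Char) :=
  match cs with
  | [] => []
  | c :: rest =>
    if pvIsNumeric c then pvTokenize rest (run ++ [c])
    else (if run.isEmpty then 1 else (PySem.Int.ofStr? (String.ofList run)).getD 0, c) ::
         pvTokenize rest []

-- Source B's token loop body; state = (x, y, (dx, dy), steps).
def pvApplyB (s : Int × Int × (Int × Int) × Int) (t : Int × Char) :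
    Int × Int × (Int × Int) × Int :=
  let (x, y, d, steps) := s
  let (n, cmd) := t
  if cmd = 'L' then
    let d := (PySem.List.pyRange 0 (PySem.Int.mod n 4) 1).foldl
      (fun (d : Int × Int) _ => (-d.2, d.1)) d
    (x, y, d, steps + n)
  else if cmd = 'R' then
    let d := (PySem.List.pyRange 0 (PySem.Int.mod n 4) 1).foldl
      (fun (d : Int × Int) _ => (d.2, -d.1)) d
    (x, y, d, steps + n)
  else if cmd = 'D' then
    (x + d.1 * n, y + d.2 * n, d, steps + n)
  else (x, y, d, steps)

def robot_movement_alt (orders : String) : Int × Int × Int :=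
  let tokens := pvTokenize orders.toList []
  let st := tokens.foldl pvApplyB (0, 0, (0, 1), 0)
  (st.1, st.2.1, st.2.2.2)

-- ===== PRECONDITION & SPEC =====
def Spec_robot_movement (orders : String) (out : Int × Int × Int) : Prop := out = robot_movement_alt orders
instance (orders : String) (out : Int × Int × Int) : Decidable (Spec_robot_movement orders out) := by unfold Spec_robot_movement; infer_instance

-- ===== CLAIM (what is proved, stated in full; the proofs are below) =====
def Claim_equal_robot_movement : Prop := ∀ (orders : String), Dom_robot_movement orders → Spec_robot_movement orders (robot_movement orders)

-- ===== LEMMAS AND PROOFS =====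

-- the direction dictionary of A, and the vector reading of a direction name
def pvDirs : PySem.Dict String (Int × Int) :=
  PySem.Dict.ofList [("S", (0, -1)), ("N", (0, 1)), ("E", (1, 0)), ("W", (-1, 0))]

def pvVec (d : String) : Int × Int := ((PySem.Dict.get? pvDirs d).getD (0, 0))

def pvGood (d : String) : Prop := d = "N" ∨ d = "E" ∨ d = "S" ∨ d = "W"

lemma pvNewDir_good {d : String} (h : pvGood d) (t : Char) : pvGood (pvNewDir d t) := by
  rcases h with h | h | h | h <;> subst h <;>
    by_cases hL : t = 'L' <;> by_cases hR : t = 'R' <;>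
      simp_all [pvNewDir, pvGood, PySem.List.index?, PySem.List.pyGet?] <;> decide

lemma pvVec_newDir_L {d : String} (h : pvGood d) :
    pvVec (pvNewDir d 'L') = (-(pvVec d).2, (pvVec d).1) := by
  rcases h with h | h | h | h <;> subst h <;> decide

lemma pvVec_newDir_R {d : String} (h : pvGood d) :
    pvVec (pvNewDir d 'R') = ((pvVec d).2, -(pvVec d).1) := by
  rcases h with h | h | h | h <;> subst h <;> decide

-- iterated rotation: A's repeated new_dir over any index list matches B's vector rotations
lemma pvRot_fold_L (l : List Int) : ∀ (d : String), pvGood d →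
    pvVec (l.foldl (fun d _ => pvNewDir d 'L') d) =
      l.foldl (fun (v : Int × Int) _ => (-v.2, v.1)) (pvVec d) ∧
    pvGood (l.foldl (fun d _ => pvNewDir d 'L') d) := by
  induction l with
  | nil => exact fun d h => ⟨rfl, h⟩
  | cons a l ih =>
    intro d h
    simpa [List.foldl_cons, pvVec_newDir_L h] using ih _ (pvNewDir_good h 'L')

lemma pvRot_fold_R (l : List Int) : ∀ (d : String), pvGood d →
    pvVec (l.foldl (fun d _ => pvNewDir d 'R') d) =
      l.foldl (fun (v : Int × Int) _ => (v.2, -v.1)) (pvVec d) ∧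
    pvGood (l.foldl (fun d _ => pvNewDir d 'R') d) := by
  induction l with
  | nil => exact fun d h => ⟨rfl, h⟩
  | cons a l ih =>
    intro d h
    simpa [List.foldl_cons, pvVec_newDir_R h] using ih _ (pvNewDir_good h 'R')

-- one command character: A's step (consuming the pending run) is B's token application
lemma pvStep_cmd (x y steps : Int) (d : String) (run : List Char) (c : Char)
    (hd : pvGood d) (hc : ¬ pvIsNumeric c = true) :
    pvApplyB (x, y, pvVec d, steps)
        (if run.isEmpty then 1 else (PySem.Int.ofStr? (String.ofList run)).getD 0, c) =
      ((pvStepA pvDirs (x, y, d, run, steps) c).1,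
       (pvStepA pvDirs (x, y, d, run, steps) c).2.1,
       pvVec (pvStepA pvDirs (x, y, d, run, steps) c).2.2.1,
       (pvStepA pvDirs (x, y, d, run, steps) c).2.2.2.2) ∧
    pvGood (pvStepA pvDirs (x, y, d, run, steps) c).2.2.1 ∧
    (pvStepA pvDirs (x, y, d, run, steps) c).2.2.2.1 = [] := by
  by_cases hrun : run.isEmpty
  · have hrun' : run = [] := List.isEmpty_iff.mp hrun
    subst hrun'
    have h1 : PySem.List.pyRange 0 1 1 = [0] := by decide
    by_cases hL : c = 'L'
    · subst hL
      exact ⟨by simp [pvApplyB, pvStepA, hc, h1, pvVec_newDir_L hd],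
             by simpa [pvStepA, hc] using pvNewDir_good hd 'L',
             by simp [pvStepA, hc]⟩
    · by_cases hR : c = 'R'
      · subst hR
        exact ⟨by simp [pvApplyB, pvStepA, hc, h1, pvVec_newDir_R hd],
               by simpa [pvStepA, hc] using pvNewDir_good hd 'R',
               by simp [pvStepA, hc]⟩
      · by_cases hD : c = 'D'
        · subst hD
          exact ⟨by simp [pvApplyB, pvStepA, hc, pvVec],
                 by simpa [pvStepA, hc] using hd,
                 by simp [pvStepA, hc]⟩
        · exact ⟨by simp [pvApplyB, pvStepA, hc, hL, hR, hD],
                 by simpa [pvStepA, hc, hL, hR, hD] using hd,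
                 by simp [pvStepA, hc, hL, hR, hD]⟩
  · have hlen : ¬ run.length = 0 := by
      simpa [List.isEmpty_iff, List.length_eq_zero_iff] using hrun
    set n : Int := (PySem.Int.ofChars? run).getD 0 with hn
    by_cases hL : c = 'L'
    · subst hL
      obtain ⟨hrot, hgood⟩ :=
        pvRot_fold_L (PySem.List.pyRange 0 (PySem.Int.mod n 4) 1) d hd
      rw [PySem.Int.mod_eq_emod_of_pos (by norm_num : (0:Int) < 4)] at hrot hgood
      refine ⟨?_, ?_, ?_⟩
      · simp [pvApplyB, pvStepA, hc, hlen, hrun, ← hn, ← hrot]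
      · simpa [pvStepA, hc, hlen, hrun, ← hn] using hgood
      · simp [pvStepA, hc, hlen, ← hn]
    · by_cases hR : c = 'R'
      · subst hR
        obtain ⟨hrot, hgood⟩ :=
          pvRot_fold_R (PySem.List.pyRange 0 (PySem.Int.mod n 4) 1) d hd
        rw [PySem.Int.mod_eq_emod_of_pos (by norm_num : (0:Int) < 4)] at hrot hgood
        refine ⟨?_, ?_, ?_⟩
        · simp [pvApplyB, pvStepA, hc, hL, hlen, hrun, ← hn, ← hrot]
        · simpa [pvStepA, hc, hlen, hrun, ← hn] using hgood
        · simp [pvStepA, hc, hlen, ← hn]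
      · by_cases hD : c = 'D'
        · subst hD
          exact ⟨by simp [pvApplyB, pvStepA, hc, hlen, hrun, pvVec, ← hn],
                 by simpa [pvStepA, hc, hlen, hrun] using hd,
                 by simp [pvStepA, hc, hlen]⟩
        · exact ⟨by simp [pvApplyB, pvStepA, hc, hlen, hL, hR, hD],
                 by simpa [pvStepA, hc, hlen, hrun, hL, hR, hD] using hd,
                 by simp [pvStepA, hc, hlen, hL, hR, hD]⟩

-- main invariant: A's fold over the remaining characters (with pending digit run)
-- equals B's fold over the tokens of those characters, projected to (x, y, steps).
lemma pvMain (cs : List Char) : ∀ (run : List Char) (x y steps : Int) (d : String),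
    pvGood d →
    (let st := cs.foldl (pvStepA pvDirs) (x, y, d, run, steps)
     ((st.1, st.2.1, st.2.2.2.2) : Int × Int × Int)) =
    (let st := (pvTokenize cs run).foldl pvApplyB (x, y, pvVec d, steps)
     (st.1, st.2.1, st.2.2.2)) := by
  induction cs with
  | nil => intros; rfl
  | cons c rest ih =>
    intro run x y steps d hd
    by_cases hnum : pvIsNumeric c = true
    · simp only [pvTokenize, List.foldl_cons, pvStepA, hnum, reduceIte]
      exact ih (run ++ [c]) x y steps d hd
    · obtain ⟨happ, hgood, hempty⟩ := pvStep_cmd x y steps d run c hd hnum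
      simp only [pvTokenize, hnum, Bool.false_eq_true, reduceIte,
        List.foldl_cons]
      rw [happ]
      have hst : pvStepA pvDirs (x, y, d, run, steps) c =
          ((pvStepA pvDirs (x, y, d, run, steps) c).1,
           (pvStepA pvDirs (x, y, d, run, steps) c).2.1,
           (pvStepA pvDirs (x, y, d, run, steps) c).2.2.1, [],
           (pvStepA pvDirs (x, y, d, run, steps) c).2.2.2.2) := by
        rw [← hempty]
      rw [hst]
      exact ih [] _ _ _ _ hgood

-- ===== VERDICT (by name: the statement is the Claim_ definition above) =====
theorem robot_movement_spec : Claim_equal_robot_movement := by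
  intro orders _
  show robot_movement orders = robot_movement_alt orders
  have h := pvMain orders.toList [] 0 0 0 "N" (Or.inl rfl)
  simpa [robot_movement, robot_movement_alt, pvDirs, pvVec] using h
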